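-- pv_equiv track=rewrite | github.com/seweissman/advent_of_code_2017 | day9_stream_processing.py | remove_ignored
-- ===== SOURCE A (Python) =====
-- def remove_ignored(stream):
--     stream_out = ""
--     ignore_next = False
--     for s in stream:
--         if ignore_next:
--             ignore_next = False
--             continue
--         if s == "!":
--             ignore_next = True
--         else:
--             ignore_next = False
--             stream_out += s
--     return stream_out
-- ===== SOURCE B (Python) =====
-- def remove_ignored(stream):
--     out = []
--     i = 0
--     n = len(stream)
--     while i < n:
--         if stream[i] == "!":
--             i += 2
--         else:
--             out.append(stream[i])
--             i += 1
--     return "".join(out)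
-- ===== Notes on version B (the rewrite author's own statement) =====
-- stated objective: simpler
-- what changed: Replaces the ignore_next boolean state machine over an iterator with an explicit index walk that jumps two positions at each ignore marker, collecting kept characters in a list joined once.
import Mathlib
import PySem

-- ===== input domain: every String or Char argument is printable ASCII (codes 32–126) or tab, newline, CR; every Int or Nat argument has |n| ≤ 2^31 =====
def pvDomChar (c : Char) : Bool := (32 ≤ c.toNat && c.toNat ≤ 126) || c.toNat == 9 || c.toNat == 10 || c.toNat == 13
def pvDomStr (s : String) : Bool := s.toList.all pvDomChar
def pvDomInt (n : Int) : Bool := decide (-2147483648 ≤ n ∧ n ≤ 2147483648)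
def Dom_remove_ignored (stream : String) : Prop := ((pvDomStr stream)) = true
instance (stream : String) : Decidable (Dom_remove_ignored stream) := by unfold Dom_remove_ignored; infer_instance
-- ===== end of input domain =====

-- B replaces A's ignore_next boolean state machine with an explicit index walk that
-- skips two characters at each '!' (simpler decomposition; return value equivalence).
-- ===== PORT A =====
def remove_ignored (stream : String) : String :=
  let st := stream.toList.foldl
    (fun (st : List Char × Bool) s =>
      if st.2 then (st.1, false)
      else if s = '!' then (st.1, true)
      else (st.1 ++ [s], false))
    ([], false)
  String.ofList st.1

-- ===== PORT B =====
-- index walk: at '!' jump two positions, else keep the char and advance one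
def removeIgnoredWalk : List Char → List Char
  | [] => []
  | '!' :: [] => []
  | '!' :: _ :: rest => removeIgnoredWalk rest
  | c :: rest => c :: removeIgnoredWalk rest

def remove_ignored_alt (stream : String) : String :=
  String.ofList (removeIgnoredWalk stream.toList)

-- ===== PRECONDITION & SPEC =====
def Spec_remove_ignored (stream : String) (out : String) : Prop := out = remove_ignored_alt stream
instance (stream : String) (out : String) : Decidable (Spec_remove_ignored stream out) := by unfold Spec_remove_ignored; infer_instance

-- ===== CLAIM (what is proved, stated in full; the proofs are below) =====
def Claim_equal_remove_ignored : Prop := ∀ (stream : String), Dom_remove_ignored stream → Spec_remove_ignored stream (remove_ignored stream)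

-- ===== LEMMAS AND PROOFS =====
theorem foldl_walk (l acc : List Char) :
    (l.foldl
      (fun (st : List Char × Bool) s =>
        if st.2 then (st.1, false)
        else if s = '!' then (st.1, true)
        else (st.1 ++ [s], false))
      (acc, false)).1 = acc ++ removeIgnoredWalk l := by
  induction l using removeIgnoredWalk.induct generalizing acc with
  | case1 => simp [removeIgnoredWalk]
  | case2 => simp [removeIgnoredWalk, List.foldl]
  | case3 x rest ih => simpa [removeIgnoredWalk, List.foldl] using ih acc
  | case4 c rest h1 h2 ih =>
      have hc : c ≠ '!' := by
        intro h; subst h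
        cases rest with
        | nil => exact h1 rfl rfl
        | cons x r => exact h2 x r rfl rfl
      simp only [List.foldl]
      rw [if_neg (by simp), if_neg hc, ih]
      simp [removeIgnoredWalk]

-- ===== VERDICT (by name: the statement is the Claim_ definition above) =====
theorem remove_ignored_spec : Claim_equal_remove_ignored := by
  intro stream _
  unfold Spec_remove_ignored remove_ignored remove_ignored_alt
  exact congrArg String.ofList (by simpa using foldl_walk stream.toList [])
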